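-- pv_equiv track=rewrite | github.com/malindeman1999/gradiometer | validations/benchmark_mixing_matrix_sparse.py | lm_index_map
-- ===== SOURCE A (Python) =====
-- def lm_index_map(lmax: int):
--     mapping = {}
--     idx = 0
--     for l in range(lmax + 1):
--         for m in range(-l, l + 1):
--             mapping[(l, m)] = idx
--             idx += 1
--     return mapping
-- ===== SOURCE B (Python) =====
-- def lm_index_map(lmax: int):
--     # Closed form: the entry (l, m) sits at sequential position l*l + l + m,
--     # so no running counter is needed.
--     return {(l, m): l * l + l + m for l in range(lmax + 1) for m in range(-l, l + 1)}
-- ===== Notes on version B (the rewrite author's own statement) =====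
-- stated objective: simpler
-- what changed: Replaces the stateful sequential counter threaded through the nested loops with a dict comprehension that computes each index directly by the closed form l*l + l + m.
import Mathlib
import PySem

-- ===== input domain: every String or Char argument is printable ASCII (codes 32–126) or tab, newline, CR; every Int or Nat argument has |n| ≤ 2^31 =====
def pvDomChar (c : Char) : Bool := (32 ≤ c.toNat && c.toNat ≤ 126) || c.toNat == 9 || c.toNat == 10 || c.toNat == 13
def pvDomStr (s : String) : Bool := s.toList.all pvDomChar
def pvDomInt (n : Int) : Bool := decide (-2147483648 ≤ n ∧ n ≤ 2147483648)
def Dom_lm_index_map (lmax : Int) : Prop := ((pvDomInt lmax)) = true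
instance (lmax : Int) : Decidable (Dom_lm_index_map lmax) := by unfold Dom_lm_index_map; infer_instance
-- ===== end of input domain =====

-- B replaces A's running index counter with the closed form l*l + l + m (objective: simpler).

-- ===== PORT A =====
-- dict keyed by (l, m) with a running counter idx, exactly as in A; items flattened to triples at the end
def lm_index_map (lmax : Int) : List (Int × Int × Int) :=
  let st :=
    (PySem.List.pyRange 0 (lmax + 1) 1).foldl
      (fun (st : PySem.Dict (Int × Int) Int × Int) l =>
        (PySem.List.pyRange (-l) (l + 1) 1).foldl
          (fun st2 m => (st2.1.insert (l, m) st2.2, st2.2 + 1)) st)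
      (PySem.Dict.empty, 0)
  st.1.items.map (fun p => (p.1.1, p.1.2, p.2))

-- ===== PORT B =====
-- dict comprehension: each entry computed independently by the closed form
def lm_index_map_alt (lmax : Int) : List (Int × Int × Int) :=
  (PySem.List.pyRange 0 (lmax + 1) 1).flatMap
    (fun l => (PySem.List.pyRange (-l) (l + 1) 1).map (fun m => (l, m, l * l + l + m)))

-- ===== PRECONDITION & SPEC =====
def Spec_lm_index_map (lmax : Int) (out : List (Int × Int × Int)) : Prop := out = lm_index_map_alt lmax
instance (lmax : Int) (out : List (Int × Int × Int)) : Decidable (Spec_lm_index_map lmax out) := by unfold Spec_lm_index_map; infer_instance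

-- ===== CLAIM (what is proved, stated in full; the proofs are below) =====
def Claim_equal_lm_index_map : Prop := ∀ (lmax : Int), Dom_lm_index_map lmax → Spec_lm_index_map lmax (lm_index_map lmax)

-- ===== LEMMAS AND PROOFS =====

-- Inner loop over fresh keys: appends its entries, with values idx + (m - a).
theorem lm_inner (l : Int) :
    ∀ (n : Nat) (a : Int) (d : PySem.Dict (Int × Int) Int) (idx : Int),
      n = ((l + 1) - a).toNat →
      (∀ m, a ≤ m → m < l + 1 → d.contains (l, m) = false) →
      (PySem.List.pyRange a (l + 1) 1).foldl
          (fun st2 m => (st2.1.insert (l, m) st2.2, st2.2 + 1)) (d, idx)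
        = (PySem.Dict.mk (d.items ++ (PySem.List.pyRange a (l + 1) 1).map
              (fun m => ((l, m), idx + (m - a)))), idx + (((l + 1) - a).toNat : Int)) := by
  intro n
  induction n with
  | zero =>
    intro a d idx hn hf
    have hle : l + 1 ≤ a := by omega
    rw [PySem.List.pyRange_one_eq_nil hle]
    simp
    omega
  | succ k ih =>
    intro a d idx hn hf
    have hlt : a < l + 1 := by omega
    rw [PySem.List.pyRange_one_cons hlt]
    simp only [List.foldl_cons, List.map_cons]
    have hfresh : d.contains (l, a) = false := hf a le_rfl hlt
    have hitems : (d.insert (l, a) idx).items = d.items ++ [((l, a), idx)] := by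
      simp [PySem.Dict.items_insert, hfresh]
    rw [ih (a + 1) (d.insert (l, a) idx) (idx + 1) (by omega)
        (fun m h1 h2 => by
          rw [PySem.Dict.contains_insert]
          have : ((l, m) == ((l, a) : Int × Int)) = false := by
            simp [Prod.ext_iff]; omega
          rw [this, hf m (by omega) h2]; rfl)]
    rw [hitems]
    have htail : (PySem.List.pyRange (a + 1) (l + 1) 1).map
          (fun m => ((l, m), idx + 1 + (m - (a + 1))))
        = (PySem.List.pyRange (a + 1) (l + 1) 1).map
          (fun m => ((l, m), idx + (m - a))) := by
      apply List.map_congr_left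
      intro m _
      have he : idx + 1 + (m - (a + 1)) = idx + (m - a) := by omega
      rw [he]
    have hhead : idx + (a - a) = idx := by omega
    simp only [Prod.mk.injEq]
    refine ⟨?_, by omega⟩
    rw [htail, List.append_assoc, List.singleton_append, hhead]

-- Outer loop: after rows 0..L-1 the dict's items are the closed-form list and idx = L*L.
theorem lm_outer (L : Nat) :
    (PySem.List.pyRange 0 (L : Int) 1).foldl
        (fun (st : PySem.Dict (Int × Int) Int × Int) l =>
          (PySem.List.pyRange (-l) (l + 1) 1).foldl
            (fun st2 m => (st2.1.insert (l, m) st2.2, st2.2 + 1)) st)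
        (PySem.Dict.empty, 0)
      = (PySem.Dict.mk ((PySem.List.pyRange 0 (L : Int) 1).flatMap
            (fun l => (PySem.List.pyRange (-l) (l + 1) 1).map
              (fun m => ((l, m), l * l + l + m)))), (L : Int) * L) := by
  induction L with
  | zero => simp [PySem.List.pyRange_one_eq_nil]; rfl
  | succ K ih =>
    have hsplit : PySem.List.pyRange 0 ((K + 1 : Nat) : Int) 1
        = PySem.List.pyRange 0 (K : Int) 1 ++ [(K : Int)] := by
      push_cast
      rw [PySem.List.pyRange_one_succ_right (by positivity)]
    rw [hsplit, List.foldl_append, List.flatMap_append, ih]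
    simp only [List.foldl_cons, List.foldl_nil, List.flatMap_cons, List.flatMap_nil,
      List.append_nil]
    have hfresh : ∀ m, -(K : Int) ≤ m → m < (K : Int) + 1 →
        (PySem.Dict.mk ((PySem.List.pyRange 0 (K : Int) 1).flatMap
          (fun l => (PySem.List.pyRange (-l) (l + 1) 1).map
            (fun m => ((l, m), l * l + l + m))))).contains ((K : Int), m) = false := by
      intro m _ _
      simp only [PySem.Dict.contains_mk, List.any_eq_false]
      rintro ⟨⟨l', m'⟩, v⟩ hmem
      simp only [List.mem_flatMap, List.mem_map] at hmem
      obtain ⟨l, hl, m0, _, heq⟩ := hmem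
      have hl' : l < (K : Int) := (PySem.List.mem_pyRange_one.mp hl).2
      simp only [Prod.mk.injEq] at heq
      simp [beq_iff_eq, Prod.ext_iff]
      intro h; omega
    rw [lm_inner (K : Int) ((((K : Int) + 1) - (-(K : Int))).toNat) (-(K : Int)) _ _ rfl hfresh]
    have hcnt : ((((K : Int) + 1) - (-(K : Int))).toNat : Int) = 2 * (K : Int) + 1 := by omega
    simp only [Prod.mk.injEq]
    constructor
    · congr 1
      congr 1
      apply List.map_congr_left
      intro m _
      have hv : (K : Int) * (K : Int) + (m - -(K : Int)) = (K : Int) * (K : Int) + (K : Int) + m := by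
        ring
      rw [hv]
    · rw [hcnt]; push_cast; ring

-- ===== VERDICT (by name: the statement is the Claim_ definition above) =====
theorem lm_index_map_spec : Claim_equal_lm_index_map := by
  intro lmax _
  unfold Spec_lm_index_map lm_index_map lm_index_map_alt
  by_cases h : lmax + 1 ≤ 0
  · rw [PySem.List.pyRange_one_eq_nil h]
    simp [PySem.Dict.empty]
  · have hL : ((lmax + 1).toNat : Int) = lmax + 1 := by omega
    rw [← hL, lm_outer]
    simp only [List.map_flatMap, List.map_map]
    rfl
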